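-- pv_equiv track=rewrite | github.com/yusufsahin/app-app | alm-app/backend/src/alm/quality/application/requirement_coverage_rollups.py | worst_status_among_tests
-- ===== SOURCE A (Python) =====
-- from typing import Literal
--
-- CoverageBucket = Literal["passed", "failed", "blocked", "not-executed", "no_run", "not_covered"]
--
-- def worst_status_among_tests(statuses: list[str | None]) -> CoverageBucket:
--     """Aggregate multiple linked tests: failed > blocked > not-executed > no_run > passed."""
--     if not statuses:
--         return "not_covered"
--     mapped: list[CoverageBucket] = []
--     for s in statuses:
--         if s is None:
--             mapped.append("no_run")
--         elif s in ("passed", "failed", "blocked", "not-executed"):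
--             mapped.append(s)  # type: ignore[assignment]
--         else:
--             mapped.append("no_run")
--     order: list[CoverageBucket] = ["failed", "blocked", "not-executed", "no_run", "passed"]
--     for o in order:
--         if o in mapped:
--             return o
--     return "not_covered"
-- ===== SOURCE B (Python) =====
-- def worst_status_among_tests(statuses):
--     """Aggregate multiple linked tests: failed > blocked > not-executed > no_run > passed."""
--     if not statuses:
--         return "not_covered"
--     names = ["failed", "blocked", "not-executed", "no_run", "passed"]
--     rank = {"failed": 0, "blocked": 1, "not-executed": 2, "passed": 4}
--     best = 4
--     for s in statuses:
--         r = 3 if s is None else rank.get(s, 3)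
--         if r < best:
--             best = r
--     return names[best]
-- ===== Notes on version B (the rewrite author's own statement) =====
-- stated objective: simpler
-- what changed: Replaces A's build-a-mapped-list-then-scan-five-buckets (two phases, repeated membership scans) with a single pass keeping the minimum priority rank seen, then one index lookup into the bucket-name table.
import Mathlib
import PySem

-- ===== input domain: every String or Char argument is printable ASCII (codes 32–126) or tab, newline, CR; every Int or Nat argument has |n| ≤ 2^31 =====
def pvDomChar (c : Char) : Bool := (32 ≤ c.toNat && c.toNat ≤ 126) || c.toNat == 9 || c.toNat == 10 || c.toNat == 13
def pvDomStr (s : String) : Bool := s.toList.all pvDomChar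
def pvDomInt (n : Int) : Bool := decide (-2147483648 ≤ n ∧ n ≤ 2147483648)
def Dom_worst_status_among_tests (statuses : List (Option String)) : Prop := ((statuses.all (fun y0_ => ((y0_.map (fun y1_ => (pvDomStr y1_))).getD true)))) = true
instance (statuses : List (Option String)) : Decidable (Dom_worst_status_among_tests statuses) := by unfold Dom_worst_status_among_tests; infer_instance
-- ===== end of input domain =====

-- B replaces A's build-a-mapped-list-then-scan-five-buckets with one running-minimum pass over
-- priority ranks followed by a single table lookup (objective: simpler).

-- ===== PORT A =====
-- loop body of A's first for-loop: which bucket is appended for status s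
def aBucket (s : Option String) : String :=
  match s with
  | none => "no_run"
  | some t => if t ∈ (["passed", "failed", "blocked", "not-executed"] : List String) then t else "no_run"

-- A's second loop: return the first bucket of `order` present in `mapped`, else "not_covered"
def aScan (order : List String) (mapped : List String) : String :=
  match order with
  | [] => "not_covered"
  | o :: rest => if o ∈ mapped then o else aScan rest mapped

def worst_status_among_tests (statuses : List (Option String)) : String :=
  if statuses = [] then "not_covered"
  else
    let mapped := statuses.foldl (fun acc s => acc ++ [aBucket s]) []
    aScan ["failed", "blocked", "not-executed", "no_run", "passed"] mapped

-- ===== PORT B =====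
def bNames : List String := ["failed", "blocked", "not-executed", "no_run", "passed"]

def bRankDict : PySem.Dict String Int :=
  PySem.Dict.ofList [("failed", 0), ("blocked", 1), ("not-executed", 2), ("passed", 4)]

-- B's loop body: rank of one status (None and unknown strings -> 3)
def bRank (s : Option String) : Int :=
  match s with
  | none => 3
  | some t => PySem.Dict.getD bRankDict t 3

def worst_status_among_tests_alt (statuses : List (Option String)) : String :=
  if statuses = [] then "not_covered"
  else
    let best := statuses.foldl (fun b s => if bRank s < b then bRank s else b) 4
    -- names[best]: best is always in 0..4, so the index is in range; "" is unreachable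
    (PySem.List.pyGet? bNames best).getD ""

-- ===== PRECONDITION & SPEC =====
def Spec_worst_status_among_tests (statuses : List (Option String)) (out : String) : Prop := out = worst_status_among_tests_alt statuses
instance (statuses : List (Option String)) (out : String) : Decidable (Spec_worst_status_among_tests statuses out) := by unfold Spec_worst_status_among_tests; infer_instance

-- ===== CLAIM (what is proved, stated in full; the proofs are below) =====
def Claim_equal_worst_status_among_tests : Prop := ∀ (statuses : List (Option String)), Dom_worst_status_among_tests statuses → Spec_worst_status_among_tests statuses (worst_status_among_tests statuses)

-- ===== LEMMAS AND PROOFS =====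

-- the five bucket names
def five : List String := ["failed", "blocked", "not-executed", "no_run", "passed"]

-- B's rank factors through A's bucket mapping
lemma bRank_eq (s : Option String) : bRank s = bRank (some (aBucket s)) := by
  match s with
  | none => decide
  | some t =>
    simp only [aBucket]
    by_cases h : t ∈ (["passed", "failed", "blocked", "not-executed"] : List String)
    · simp [h]
    · rw [if_neg h]
      have hd : bRankDict = PySem.Dict.mk [("failed", 0), ("blocked", 1), ("not-executed", 2), ("passed", 4)] := by decide
      simp only [List.mem_cons, not_or] at h
      obtain ⟨h1, h2, h3, h4, -⟩ := h
      simp [bRank, hd, PySem.Dict.getD_eq_get?_getD, beq_iff_eq,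
            Ne.symm h1, Ne.symm h2, Ne.symm h3, Ne.symm h4, PySem.Dict.get?]

lemma aBucket_mem_five (s : Option String) : aBucket s ∈ five := by
  match s with
  | none => decide
  | some t =>
    simp only [aBucket]
    by_cases h : t ∈ (["passed", "failed", "blocked", "not-executed"] : List String)
    · simp only [if_pos h]
      fin_cases h <;> decide
    · simp [h, five]

-- the running minimum over the mapped buckets
def bestOf (M : List String) : Int :=
  M.foldl (fun b m => if bRank (some m) < b then bRank (some m) else b) 4

lemma foldl_min_le_init (M : List String) (a : Int) :
    M.foldl (fun b m => if bRank (some m) < b then bRank (some m) else b) a ≤ a := by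
  induction M generalizing a with
  | nil => simp
  | cons x xs ih =>
    simp only [List.foldl_cons]
    split
    · exact le_trans (ih _) (le_of_lt (by assumption))
    · exact ih a

lemma foldl_min_le_mem (M : List String) (m : String) (hm : m ∈ M) :
    bestOf M ≤ bRank (some m) := by
  unfold bestOf
  generalize (4 : Int) = a
  induction M generalizing a with
  | nil => cases hm
  | cons x xs ih =>
    simp only [List.foldl_cons]
    rcases List.mem_cons.mp hm with h | h
    · subst h
      split
      · exact foldl_min_le_init xs _
      · exact le_trans (foldl_min_le_init xs a) (by omega)
    · exact ih h _

lemma foldl_min_achieved (M : List String) (a : Int) :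
    M.foldl (fun b m => if bRank (some m) < b then bRank (some m) else b) a = a ∨
    ∃ m ∈ M, M.foldl (fun b m => if bRank (some m) < b then bRank (some m) else b) a = bRank (some m) := by
  induction M generalizing a with
  | nil => left; rfl
  | cons x xs ih =>
    simp only [List.foldl_cons]
    split
    · rcases ih (bRank (some x)) with h | ⟨m, hm, h⟩
      · right; exact ⟨x, List.mem_cons_self .., h⟩
      · right; exact ⟨m, List.mem_cons_of_mem _ hm, h⟩
    · rcases ih a with h | ⟨m, hm, h⟩
      · left; exact h
      · right; exact ⟨m, List.mem_cons_of_mem _ hm, h⟩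

lemma bRank_five_bounds (m : String) (hm : m ∈ five) : 0 ≤ bRank (some m) ∧ bRank (some m) ≤ 4 := by
  fin_cases hm <;> simp [bRank, bRankDict] <;> decide

lemma best_achieved (M : List String) (hne : M ≠ []) (hfive : ∀ m ∈ M, m ∈ five) :
    ∃ m ∈ M, bRank (some m) = bestOf M := by
  rcases foldl_min_achieved M 4 with h | ⟨m, hm, h⟩
  · obtain ⟨x, xs, rfl⟩ := List.exists_cons_of_ne_nil hne
    have hx : x ∈ x :: xs := List.mem_cons_self ..
    have hle := foldl_min_le_mem _ x hx
    have hb := (bRank_five_bounds x (hfive x hx)).2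
    refine ⟨x, hx, ?_⟩
    unfold bestOf at *
    omega
  · exact ⟨m, hm, h.symm⟩

lemma not_mem_of_rank_lt (M : List String) (m : String) (h : bRank (some m) < bestOf M) :
    m ∉ M := fun hc => absurd (foldl_min_le_mem M m hc) (not_le.mpr h)

-- the scan over the five buckets returns the name of the minimum rank
lemma scan_eq_best (M : List String) (hne : M ≠ []) (hfive : ∀ m ∈ M, m ∈ five) :
    aScan ["failed", "blocked", "not-executed", "no_run", "passed"] M =
      (PySem.List.pyGet? bNames (bestOf M)).getD "" := by
  obtain ⟨m, hm, hv⟩ := best_achieved M hne hfive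
  have hmf := hfive m hm
  fin_cases hmf
  · -- m = "failed", bestOf M = 0
    have h0 : bestOf M = 0 := by rw [← hv]; decide
    rw [h0]
    simp [aScan, hm]
    decide
  · -- "blocked", bestOf M = 1
    have h0 : bestOf M = 1 := by rw [← hv]; decide
    have n0 : "failed" ∉ M := not_mem_of_rank_lt M _ (by rw [h0]; decide)
    rw [h0]
    simp [aScan, hm, n0]
    decide
  · -- "not-executed", bestOf M = 2
    have h0 : bestOf M = 2 := by rw [← hv]; decide
    have n0 : "failed" ∉ M := not_mem_of_rank_lt M _ (by rw [h0]; decide)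
    have n1 : "blocked" ∉ M := not_mem_of_rank_lt M _ (by rw [h0]; decide)
    rw [h0]
    simp [aScan, hm, n0, n1]
    decide
  · -- "no_run", bestOf M = 3
    have h0 : bestOf M = 3 := by rw [← hv]; decide
    have n0 : "failed" ∉ M := not_mem_of_rank_lt M _ (by rw [h0]; decide)
    have n1 : "blocked" ∉ M := not_mem_of_rank_lt M _ (by rw [h0]; decide)
    have n2 : "not-executed" ∉ M := not_mem_of_rank_lt M _ (by rw [h0]; decide)
    rw [h0]
    simp [aScan, hm, n0, n1, n2]
    decide
  · -- "passed", bestOf M = 4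
    have h0 : bestOf M = 4 := by rw [← hv]; decide
    have n0 : "failed" ∉ M := not_mem_of_rank_lt M _ (by rw [h0]; decide)
    have n1 : "blocked" ∉ M := not_mem_of_rank_lt M _ (by rw [h0]; decide)
    have n2 : "not-executed" ∉ M := not_mem_of_rank_lt M _ (by rw [h0]; decide)
    have n3 : "no_run" ∉ M := not_mem_of_rank_lt M _ (by rw [h0]; decide)
    rw [h0]
    simp [aScan, hm, n0, n1, n2, n3]
    decide

-- ===== VERDICT (by name: the statement is the Claim_ definition above) =====
theorem worst_status_among_tests_spec : Claim_equal_worst_status_among_tests := by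
  intro statuses _
  unfold Spec_worst_status_among_tests worst_status_among_tests worst_status_among_tests_alt
  by_cases hne : statuses = []
  · simp [hne]
  · rw [if_neg hne, if_neg hne]
    have hmap : statuses.foldl (fun acc s => acc ++ [aBucket s]) [] = statuses.map aBucket := by
      simpa using PySem.List.foldl_append_singleton_eq_map aBucket statuses []
    have hfold : statuses.foldl (fun b s => if bRank s < b then bRank s else b) 4
        = bestOf (statuses.map aBucket) := by
      unfold bestOf
      rw [List.foldl_map]
      apply PySem.List.foldl_congr_mem
      intro acc x _
      rw [bRank_eq]
    rw [hmap, hfold]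
    exact scan_eq_best (statuses.map aBucket)
      (by simpa using hne)
      (fun m hm => by obtain ⟨s, _, rfl⟩ := List.mem_map.mp hm; exact aBucket_mem_five s)
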